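-- pv_equiv track=rewrite | github.com/HugeDog/Guanglu-Zhou_OS_experiment | os05.py | ret
-- ===== SOURCE A (Python) =====
-- def ret(start,lists):
--     sums = 0
--     seq = []
--     res = []
--     pos = start
--     for item in lists:
--         temp = abs(item - pos)
--         sums += temp
--         seq.append(item)
--         res.append(temp)
--         pos = item
--     return seq,res,sums,pos
-- ===== SOURCE B (Python) =====
-- def ret(start, lists):
--     # Divide and conquer: solve each half-segment independently and combine.
--     # solve(pos, chunk) -> (movements, their sum, final position) for the
--     # segment `chunk` entered at position `pos`.
--     def solve(pos, chunk):
--         if not chunk: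
--             return [], 0, pos
--         if len(chunk) == 1:
--             d = abs(chunk[0] - pos)
--             return [d], d, chunk[0]
--         mid = len(chunk) // 2
--         resL, sumL, posL = solve(pos, chunk[:mid])
--         resR, sumR, posR = solve(posL, chunk[mid:])
--         return resL + resR, sumL + sumR, posR
--
--     seq = list(lists)
--     res, sums, pos = solve(start, seq)
--     return seq, res, sums, pos
-- ===== Notes on version B (the rewrite author's own statement) =====
-- stated objective: alternative
-- what changed: Replaces A's single forward loop with mutated accumulators by a divide-and-conquer: the list is split in halves, each segment is solved recursively (the right half seeded with the left half's final position) and the segment results are concatenated.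
import Mathlib
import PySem

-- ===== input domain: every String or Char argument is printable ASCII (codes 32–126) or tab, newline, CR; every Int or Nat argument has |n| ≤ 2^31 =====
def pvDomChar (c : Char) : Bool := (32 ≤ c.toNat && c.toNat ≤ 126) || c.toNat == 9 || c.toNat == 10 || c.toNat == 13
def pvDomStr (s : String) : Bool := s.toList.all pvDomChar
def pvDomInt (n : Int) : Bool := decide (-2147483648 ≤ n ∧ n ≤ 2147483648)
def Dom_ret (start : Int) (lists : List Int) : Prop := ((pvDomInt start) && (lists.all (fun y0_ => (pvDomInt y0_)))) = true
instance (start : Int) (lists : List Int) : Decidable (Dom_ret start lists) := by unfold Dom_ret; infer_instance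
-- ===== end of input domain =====

-- B replaces A's forward accumulator loop by a divide-and-conquer over half-segments (alternative decomposition, same results).

-- ===== PORT A =====
-- loop state: (sums, seq, res, pos), updated exactly as A's for-loop does
def ret (start : Int) (lists : List Int) : List Int × List Int × Int × Int :=
  let st := lists.foldl
    (fun (s : Int × List Int × List Int × Int) item =>
      let temp := |item - s.2.2.2|
      (s.1 + temp, s.2.1 ++ [item], s.2.2.1 ++ [temp], item))
    (0, [], [], start)
  (st.2.1, st.2.2.1, st.1, st.2.2.2)

-- ===== PORT B =====
-- solve(pos, chunk) -> (movements, their sum, final position); chunk[:mid]/chunk[mid:] are List.take/List.drop (exact for 0 ≤ mid ≤ len)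
def retSolve (pos : Int) (chunk : List Int) : List Int × Int × Int :=
  match chunk with
  | [] => ([], 0, pos)
  | [x] => ([|x - pos|], |x - pos|, x)
  | a :: b :: t =>
    let chunk := a :: b :: t
    let mid := chunk.length / 2
    let L := retSolve pos (chunk.take mid)
    let R := retSolve L.2.2 (chunk.drop mid)
    (L.1 ++ R.1, L.2.1 + R.2.1, R.2.2)
termination_by chunk.length
decreasing_by
  · simp [List.length_take]; omega
  · simp [List.length_drop]; omega

def ret_alt (start : Int) (lists : List Int) : List Int × List Int × Int × Int :=
  let seq := lists
  let r := retSolve start seq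
  (seq, r.1, r.2.1, r.2.2)

-- ===== PRECONDITION & SPEC =====
def Spec_ret (start : Int) (lists : List Int) (out : List Int × List Int × Int × Int) : Prop := out = ret_alt start lists
instance (start : Int) (lists : List Int) (out : List Int × List Int × Int × Int) : Decidable (Spec_ret start lists out) := by unfold Spec_ret; infer_instance

-- ===== CLAIM =====
def Claim_equal_ret : Prop := ∀ (start : Int) (lists : List Int), Dom_ret start lists → Spec_ret start lists (ret start lists)

-- ===== LEMMAS AND PROOFS =====
-- linear reference recursion used only in the proofs
def linRef (pos : Int) (l : List Int) : List Int × Int × Int :=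
  match l with
  | [] => ([], 0, pos)
  | x :: t =>
    let r := linRef x t
    (|x - pos| :: r.1, |x - pos| + r.2.1, r.2.2)

theorem linRef_append (a b : List Int) (pos : Int) :
    linRef pos (a ++ b) =
      ((linRef pos a).1 ++ (linRef (linRef pos a).2.2 b).1,
       (linRef pos a).2.1 + (linRef (linRef pos a).2.2 b).2.1,
       (linRef (linRef pos a).2.2 b).2.2) := by
  induction a generalizing pos with
  | nil => simp [linRef]
  | cons x t ih => simp [linRef, ih x]; ring

theorem retSolve_eq_linRef (pos : Int) (chunk : List Int) :
    retSolve pos chunk = linRef pos chunk := by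
  induction pos, chunk using retSolve.induct with
  | case1 pos => simp [retSolve, linRef]
  | case2 pos x => simp [retSolve, linRef]
  | case3 pos a b t ih1 ih2 ih3 ih4 ih5 ih6 =>
    rw [retSolve]
    rw [ih6, ih4]
    simp only [ih3, ih2, ih1, ih4]
    conv_rhs => rw [← List.take_append_drop ((a :: b :: t).length / 2) (a :: b :: t)]
    rw [linRef_append]

theorem ret_fold_eq (lists : List Int) (start s0 : Int) (sq0 r0 : List Int) :
    lists.foldl
      (fun (s : Int × List Int × List Int × Int) item =>
        let temp := |item - s.2.2.2|
        (s.1 + temp, s.2.1 ++ [item], s.2.2.1 ++ [temp], item))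
      (s0, sq0, r0, start) =
    (s0 + (linRef start lists).2.1, sq0 ++ lists, r0 ++ (linRef start lists).1,
     (linRef start lists).2.2) := by
  induction lists generalizing start s0 sq0 r0 with
  | nil => simp [linRef]
  | cons h t ih => simp [linRef, ih]; ring

-- ===== VERDICT =====
theorem ret_spec : Claim_equal_ret := by
  intro start lists _
  unfold Spec_ret ret ret_alt
  simp [ret_fold_eq, retSolve_eq_linRef]
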